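-- pv_equiv track=rewrite | github.com/Lindooren/CAINA-assembler-is-not-assembler-RE- | modules/opcode_operations/Bitwise.py | BitsShifting
-- ===== SOURCE A (Python) =====
-- def BinaryConvertion (value):
--     Binary = "0" + bin(value).split("b")[1]
--     if value < 0:
--
--         # one's complement operation
--         BinaryList = list(Binary)
--         for i in range(len(BinaryList)):
--             if BinaryList[i] == "0":
--                 BinaryList[i] = "1"
--
--             else:
--                 BinaryList[i] = "0"
--
--         # two's complement operation
--         Carry = 1
--         for i in range(-1, -1 - len(BinaryList), -1):
--             Result = int(BinaryList[i]) + Carry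
--             if Result <= 1:
--                 Carry = 0
--
--             else:
--                 Result = 0
--                 Carry = 1
--
--             BinaryList[i] = str(Result)
--
--         Binary = "".join(BinaryList)
--
--     return Binary
--
-- def DenaryConvertion (binary_str):
--     Denary = 0
--     Exponent = 0
--     for i in range(-1, -1 - len(binary_str), -1):
--         BitVal = int(binary_str[i]) * (2 ** Exponent)
--
--         # treatment for sign bit 1
--         if i == (0 - len(binary_str)) and binary_str[i] == "1":
--             BitVal = 0 - BitVal
--
--         Exponent += 1
--         Denary += BitVal
--
--     return Denary
--
-- def BitsShifting (ACC, num_places, opcode):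
--     BinaryVal = BinaryConvertion(ACC)
--     for i in range(num_places):
--         if opcode == "LSL":
--             BinaryVal = BinaryVal[1:] + "0"
--
--         else:
--             BinaryVal = "0" + BinaryVal[::-1][1:][::-1]
--
--     return DenaryConvertion(BinaryVal)
-- ===== SOURCE B (Python) =====
-- def BitsShifting(ACC, num_places, opcode):
--     # Fixed width: one sign bit in front of the binary digits of |ACC|.
--     L = (abs(ACC).bit_length() or 1) + 1
--     M = 1 << L
--     R = ACC % M  # unsigned L-bit value
--     if num_places > 0:
--         if opcode == "LSL":
--             R = (R << num_places) % M
--         else: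
--             R = R >> num_places
--     # reinterpret as L-bit two's-complement signed value
--     return R - M if R >= M // 2 else R
-- ===== Notes on version B (the rewrite author's own statement) =====
-- stated objective: faster
-- what changed: Replaced the string pipeline (binary string, per-character two's complement, one character shift per iteration, positional decode) by direct integer arithmetic: width L from bit_length, unsigned value ACC % 2**L, one single shift, signed reinterpretation.
import Mathlib
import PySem

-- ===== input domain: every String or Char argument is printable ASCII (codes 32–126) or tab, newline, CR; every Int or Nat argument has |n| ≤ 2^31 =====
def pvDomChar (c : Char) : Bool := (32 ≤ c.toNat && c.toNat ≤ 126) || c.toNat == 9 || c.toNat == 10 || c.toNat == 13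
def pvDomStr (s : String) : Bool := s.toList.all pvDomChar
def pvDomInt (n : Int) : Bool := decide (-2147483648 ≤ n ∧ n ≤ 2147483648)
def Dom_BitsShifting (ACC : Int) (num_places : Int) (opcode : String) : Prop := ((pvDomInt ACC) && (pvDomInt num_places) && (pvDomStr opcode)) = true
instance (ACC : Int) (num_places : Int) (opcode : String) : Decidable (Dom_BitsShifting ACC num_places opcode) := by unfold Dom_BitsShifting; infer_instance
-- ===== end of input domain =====

-- B replaces A's per-place string-shifting pipeline by direct integer arithmetic (width from
-- bit_length, unsigned value mod 2^L, one single shift, signed reinterpretation); objective: faster.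

-- ===== PORT A =====
-- bin(value).split("b")[1] : binary digits of |value|, most significant first ("0" for 0); exact.
def pvBinGo : Nat → List Char
  | 0 => []
  | n+1 => pvBinGo ((n+1)/2) ++ [if (n+1) % 2 = 1 then '1' else '0']
decreasing_by exact Nat.div_lt_self (Nat.succ_pos n) (by norm_num)

def pvBinDigits (n : Nat) : List Char := if n = 0 then ['0'] else pvBinGo n

-- one's complement loop (list.map over the same characters, same branch)
def pvOnesComp (l : List Char) : List Char := l.map (fun c => if c = '0' then '1' else '0')

-- two's complement loop: A walks the list from index -1 backwards carrying Carry;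
-- ported as recursion over the reversed list. int(c) for the digit characters this
-- helper receives is c.toNat - 48; str(Result) for Result ∈ {0,1} is the digit char.
def pvAddCarryRev : List Char → Int → List Char
  | [], _ => []
  | d :: rest, carry =>
    let r := ((d.toNat : Int) - 48) + carry
    if r ≤ 1 then (if r = 1 then '1' else '0') :: pvAddCarryRev rest 0
    else '0' :: pvAddCarryRev rest 1

def BinaryConvertion (value : Int) : List Char :=
  let Binary := '0' :: pvBinDigits value.natAbs
  if value < 0 then (pvAddCarryRev (pvOnesComp Binary).reverse 1).reverse
  else Binary

-- DenaryConvertion's loop from index -1 backwards with Exponent; recursion over the reversed list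
-- (the sign-bit case i == -len is the last processed element, i.e. rest = []).
def pvDenaryRev : List Char → Nat → Int
  | [], _ => 0
  | c :: rest, e =>
    let bitVal := ((c.toNat : Int) - 48) * 2 ^ e
    let bitVal := if rest = [] ∧ c = '1' then -bitVal else bitVal
    bitVal + pvDenaryRev rest (e+1)

def DenaryConvertion (l : List Char) : Int := pvDenaryRev l.reverse 0

-- one iteration of A's for-loop (BinaryVal[1:] + "0" / "0" + BinaryVal[::-1][1:][::-1])
def pvShiftStep (opcode : String) (bv : List Char) : List Char :=
  if opcode == "LSL" then bv.drop 1 ++ ['0'] else '0' :: bv.dropLast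

def pvShiftLoop (opcode : String) : Nat → List Char → List Char
  | 0, bv => bv
  | k+1, bv => pvShiftLoop opcode k (pvShiftStep opcode bv)

def BitsShifting (ACC : Int) (num_places : Int) (opcode : String) : Int :=
  DenaryConvertion (pvShiftLoop opcode num_places.toNat (BinaryConvertion ACC))

-- ===== PORT B =====
def BitsShifting_alt (ACC : Int) (num_places : Int) (opcode : String) : Int :=
  let bl := PySem.Int.bitLength ACC          -- abs(ACC).bit_length() (bitLength reads |n|)
  let L := (if bl = 0 then 1 else bl) + 1    -- (… or 1) + 1
  let M : Int := (1 : Int) <<< L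
  let R := PySem.Int.mod ACC M
  let R := if num_places > 0 then
      (if opcode == "LSL" then PySem.Int.mod (R <<< num_places.toNat) M
       else R >>> num_places.toNat)
    else R
  if R ≥ PySem.Int.floordiv M 2 then R - M else R

-- ===== PRECONDITION & SPEC =====
def Spec_BitsShifting (ACC : Int) (num_places : Int) (opcode : String) (out : Int) : Prop := out = BitsShifting_alt ACC num_places opcode
instance (ACC : Int) (num_places : Int) (opcode : String) (out : Int) : Decidable (Spec_BitsShifting ACC num_places opcode out) := by unfold Spec_BitsShifting; infer_instance

-- ===== CLAIM (what is proved, stated in full; the proofs are below) =====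
def Claim_equal_BitsShifting : Prop := ∀ (ACC : Int) (num_places : Int) (opcode : String), Dom_BitsShifting ACC num_places opcode → Spec_BitsShifting ACC num_places opcode (BitsShifting ACC num_places opcode)

-- ===== LEMMAS AND PROOFS =====

-- the numeric value of a digit character and of a digit list, least significant first
def pvBit (c : Char) : Nat := if c = '1' then 1 else 0
def pvVrev : List Char → Nat
  | [] => 0
  | c :: r => pvBit c + 2 * pvVrev r
-- value of a digit list, most significant first (as A's strings are written)
def pvV (l : List Char) : Nat := pvVrev l.reverse
def pvBits (l : List Char) : Prop := ∀ c ∈ l, c = '0' ∨ c = '1'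

lemma pvBit_le_one (c : Char) : pvBit c ≤ 1 := by
  unfold pvBit; split <;> omega

lemma pvBit_zero : pvBit '0' = 0 := by decide

lemma pvBit_one : pvBit '1' = 1 := by decide

lemma pvVrev_lt (r : List Char) : pvVrev r < 2 ^ r.length := by
  induction r with
  | nil => simp [pvVrev]
  | cons c r ih =>
    have := pvBit_le_one c
    simp only [pvVrev, List.length_cons, pow_succ]
    omega

lemma pvV_lt (l : List Char) : pvV l < 2 ^ l.length := by
  simpa [pvV] using pvVrev_lt l.reverse

lemma pvVrev_append_single (xs : List Char) (c : Char) :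
    pvVrev (xs ++ [c]) = pvVrev xs + pvBit c * 2 ^ xs.length := by
  induction xs with
  | nil => simp [pvVrev]
  | cons x xs ih => simp [pvVrev, ih, pow_succ]; ring

lemma pvV_cons (c : Char) (l : List Char) :
    pvV (c :: l) = pvBit c * 2 ^ l.length + pvV l := by
  simp [pvV, pvVrev_append_single]; ring

lemma pvV_append_single (l : List Char) (c : Char) :
    pvV (l ++ [c]) = 2 * pvV l + pvBit c := by
  simp [pvV, pvVrev]; ring

lemma pvBinGo_spec : ∀ n : Nat, 0 < n →
    pvV (pvBinGo n) = n ∧ (pvBinGo n).length = PySem.Int.bitLength (n : Int) ∧ pvBits (pvBinGo n) := by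
  intro n
  induction n using Nat.strong_induction_on with
  | _ n ih =>
    intro hn
    obtain ⟨m, rfl⟩ : ∃ m, n = m + 1 := ⟨n - 1, by omega⟩
    rw [pvBinGo]
    by_cases h2 : (m + 1) / 2 = 0
    · have hm : m = 0 := by omega
      subst hm
      have hgo : pvBinGo ((0 + 1) / 2) = [] := by rw [show (0+1)/2 = 0 from rfl, pvBinGo]
      rw [hgo, List.nil_append]
      norm_num
      refine ⟨by decide, by decide, ?_⟩
      intro c hc
      rcases List.mem_singleton.mp hc with rfl
      right; rfl
    · have h2' : 0 < (m + 1) / 2 := Nat.pos_of_ne_zero h2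
      obtain ⟨ihV, ihL, ihB⟩ := ih ((m + 1) / 2) (by omega) h2'
      refine ⟨?_, ?_, ?_⟩
      · rw [pvV_append_single, ihV]
        have hbit : pvBit (if (m + 1) % 2 = 1 then '1' else '0') = (m + 1) % 2 := by
          rcases Nat.mod_two_eq_zero_or_one (m + 1) with h | h <;> simp [h, pvBit]
        rw [hbit]; omega
      · rw [List.length_append, ihL, List.length_singleton,
          PySem.Int.bitLength_natCast (Nat.succ_pos m)]
      · intro c hc
        rcases List.mem_append.mp hc with h | h
        · exact ihB c h
        · rcases List.mem_singleton.mp h with rfl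
          split <;> simp

lemma pvOnesComp_vrev (r : List Char) (h : pvBits r) :
    pvVrev (pvOnesComp r) = 2 ^ r.length - 1 - pvVrev r := by
  induction r with
  | nil => simp [pvOnesComp, pvVrev]
  | cons c r ih =>
    have hr : pvBits r := fun x hx => h x (List.mem_cons_of_mem _ hx)
    have hvr := pvVrev_lt r
    rcases h c (List.mem_cons_self ..) with rfl | rfl
    · have hstep : pvOnesComp ('0' :: r) = '1' :: pvOnesComp r := by simp [pvOnesComp]
      rw [hstep, pvVrev, pvVrev, ih hr, List.length_cons, pow_succ, pvBit_zero, pvBit_one]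
      omega
    · have hstep : pvOnesComp ('1' :: r) = '0' :: pvOnesComp r := by simp [pvOnesComp]
      rw [hstep, pvVrev, pvVrev, ih hr, List.length_cons, pow_succ, pvBit_zero, pvBit_one]
      omega

lemma pvAddCarryRev_zero (r : List Char) (h : pvBits r) : pvAddCarryRev r 0 = r := by
  induction r with
  | nil => rfl
  | cons d rest ih =>
    have hrest : pvBits rest := fun x hx => h x (List.mem_cons_of_mem _ hx)
    rcases h d (List.mem_cons_self ..) with rfl | rfl <;>
      simp [pvAddCarryRev, ih hrest]

lemma pvAddCarryRev_one (r : List Char) (h : pvBits r) :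
    pvVrev (pvAddCarryRev r 1) = (pvVrev r + 1) % 2 ^ r.length
    ∧ (pvAddCarryRev r 1).length = r.length ∧ pvBits (pvAddCarryRev r 1) := by
  induction r with
  | nil => exact ⟨by simp [pvAddCarryRev, pvVrev], rfl, by intro c hc; cases hc⟩
  | cons d rest ih =>
    have hrest : pvBits rest := fun x hx => h x (List.mem_cons_of_mem _ hx)
    have hvr := pvVrev_lt rest
    rcases h d (List.mem_cons_self ..) with rfl | rfl
    · -- d = '0' : digit becomes '1', carry stops
      rw [show pvAddCarryRev ('0' :: rest) 1 = '1' :: pvAddCarryRev rest 0 by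
        simp [pvAddCarryRev]]
      rw [pvAddCarryRev_zero rest hrest]
      refine ⟨?_, rfl, ?_⟩
      · have hlt : pvBit '0' + 2 * pvVrev rest + 1 < 2 ^ (rest.length + 1) := by
          rw [pvBit_zero, pow_succ]; omega
        rw [pvVrev, pvVrev, List.length_cons, Nat.mod_eq_of_lt hlt, pvBit_zero, pvBit_one]
        omega
      · intro c hc
        rcases List.mem_cons.mp hc with rfl | hc
        · right; rfl
        · exact hrest c hc
    · -- d = '1' : digit becomes '0', carry continues
      rw [show pvAddCarryRev ('1' :: rest) 1 = '0' :: pvAddCarryRev rest 1 by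
        simp [pvAddCarryRev]]
      obtain ⟨ihv, ihl, ihb⟩ := ih hrest
      refine ⟨?_, by simp [ihl], ?_⟩
      · rw [pvVrev, pvVrev, ihv, List.length_cons]
        have h2 : pvBit '1' + 2 * pvVrev rest + 1 = 2 * (pvVrev rest + 1) := by
          rw [pvBit_one]; omega
        rw [h2, pow_succ, mul_comm (2 ^ rest.length) 2, Nat.mul_mod_mul_left, pvBit_zero]
        omega
      · intro c hc
        rcases List.mem_cons.mp hc with rfl | hc
        · left; rfl
        · exact ihb c hc

lemma pvBinConv_spec (ACC : Int) :
    pvBits (BinaryConvertion ACC)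
    ∧ (BinaryConvertion ACC).length
        = (if PySem.Int.bitLength ACC = 0 then 1 else PySem.Int.bitLength ACC) + 1
    ∧ ((pvV (BinaryConvertion ACC) : Int)) = ACC % 2 ^ (BinaryConvertion ACC).length := by
  -- the plain digit string '0' :: digits(|ACC|)
  have base : pvBits ('0' :: pvBinDigits ACC.natAbs)
      ∧ ('0' :: pvBinDigits ACC.natAbs).length
          = (if PySem.Int.bitLength ACC = 0 then 1 else PySem.Int.bitLength ACC) + 1
      ∧ pvV ('0' :: pvBinDigits ACC.natAbs) = ACC.natAbs := by
    have habs : PySem.Int.bitLength ((ACC.natAbs : Nat) : Int) = PySem.Int.bitLength ACC := by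
      by_cases hneg : ACC < 0
      case neg => rw [Int.natAbs_of_nonneg (by omega)]
      case pos =>
        have h1 : ((ACC.natAbs : Nat) : Int) = -ACC := by omega
        rw [h1, PySem.Int.bitLength_neg]
    by_cases h0 : ACC.natAbs = 0
    · have hbl : PySem.Int.bitLength ACC = 0 := by
        rw [← habs, h0]; decide
      rw [h0, hbl]
      refine ⟨?_, by decide, by decide⟩
      intro c hc
      rcases List.mem_cons.mp hc with rfl | hc
      · left; rfl
      · rcases List.mem_singleton.mp (by simpa [pvBinDigits] using hc) with rfl
        left; rfl
    · obtain ⟨hV, hL, hB⟩ := pvBinGo_spec ACC.natAbs (Nat.pos_of_ne_zero h0)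
      have hdig : pvBinDigits ACC.natAbs = pvBinGo ACC.natAbs := by
        simp [pvBinDigits, h0]
      have hblne : PySem.Int.bitLength ACC ≠ 0 := by
        intro hz
        have hlt2 := PySem.Int.lt_two_pow_bitLength ACC
        rw [hz] at hlt2; simp at hlt2; omega
      refine ⟨?_, ?_, ?_⟩
      · intro c hc
        rcases List.mem_cons.mp hc with rfl | hc
        · left; rfl
        · rw [hdig] at hc; exact hB c hc
      · rw [List.length_cons, hdig, hL, habs, if_neg hblne]
      · rw [pvV_cons, hdig, hV]; simp [pvBit]
  obtain ⟨hB0, hL0, hV0⟩ := base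
  -- bound: |ACC| < 2^(len-1) ≤ 2^len
  have hlt : ACC.natAbs < 2 ^ (('0' :: pvBinDigits ACC.natAbs).length - 1) := by
    have h1 := pvV_lt (pvBinDigits ACC.natAbs)
    rw [pvV_cons, pvBit_zero, Nat.zero_mul, Nat.zero_add] at hV0
    simp only [List.length_cons, Nat.add_sub_cancel]
    omega
  unfold BinaryConvertion
  split
  · -- ACC < 0 : one's complement + carry
    rename_i hneg
    set l0 := '0' :: pvBinDigits ACC.natAbs with hl0
    have hb0r : pvBits l0.reverse := fun c hc => hB0 c (List.mem_reverse.mp hc)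
    have hocr : (pvOnesComp l0).reverse = pvOnesComp l0.reverse := by
      simp [pvOnesComp, List.map_reverse]
    have hbitsoc : pvBits (pvOnesComp l0.reverse) := by
      intro c hc
      simp only [pvOnesComp, List.mem_map] at hc
      obtain ⟨x, _, rfl⟩ := hc
      split <;> simp
    obtain ⟨hcv, hcl, hcb⟩ := pvAddCarryRev_one (pvOnesComp l0.reverse) hbitsoc
    have hvoc : pvVrev (pvOnesComp l0.reverse) = 2 ^ l0.length - 1 - ACC.natAbs := by
      rw [pvOnesComp_vrev l0.reverse hb0r, List.length_reverse]
      unfold pvV at hV0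
      omega
    have hlen2 : (pvOnesComp l0.reverse).length = l0.length := by
      simp [pvOnesComp]
    have hn1 : 1 ≤ ACC.natAbs := by omega
    have hnlt : ACC.natAbs < 2 ^ l0.length := by
      have hmono : (2:Nat) ^ (l0.length - 1) ≤ 2 ^ l0.length :=
        Nat.pow_le_pow_right (by norm_num) (by omega)
      omega
    have hres : pvV (pvAddCarryRev (pvOnesComp l0).reverse 1).reverse
        = 2 ^ l0.length - ACC.natAbs := by
      unfold pvV
      rw [List.reverse_reverse, hocr, hcv, hvoc, hlen2]
      rw [Nat.mod_eq_of_lt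
        (show 2 ^ l0.length - 1 - ACC.natAbs + 1 < 2 ^ l0.length by omega)]
      omega
    have hreslen : (pvAddCarryRev (pvOnesComp l0).reverse 1).reverse.length = l0.length := by
      rw [List.length_reverse, hocr, hcl, hlen2]
    refine ⟨?_, by rw [hreslen, hl0]; exact hL0, ?_⟩
    · intro c hc
      exact hcb c (by rw [← hocr]; exact List.mem_reverse.mp hc)
    · rw [hres, hreslen]
      have hA : ACC = -(ACC.natAbs : Int) := by omega
      have hcast : ((2 ^ l0.length - ACC.natAbs : Nat) : Int)
          = (2:Int) ^ l0.length - (ACC.natAbs : Int) := by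
        push_cast [Nat.cast_sub (le_of_lt hnlt)]; ring
      rw [hcast]
      have hmod : ACC % 2 ^ l0.length = ((2:Int) ^ l0.length - ACC.natAbs) % 2 ^ l0.length := by
        conv_lhs => rw [hA]
        rw [show (2:Int) ^ l0.length - (ACC.natAbs:Int)
            = -(ACC.natAbs:Int) + 2 ^ l0.length * 1 by ring, Int.add_mul_emod_self_left]
      have hnlt' : ((ACC.natAbs : Nat) : Int) < 2 ^ l0.length := by exact_mod_cast hnlt
      rw [hmod, Int.emod_eq_of_lt (by omega) (by omega)]
  · -- 0 ≤ ACC : the string is the value itself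
    rename_i hpos
    refine ⟨hB0, hL0, ?_⟩
    have hAe : ((ACC.natAbs : Nat) : Int) = ACC := Int.natAbs_of_nonneg (by omega)
    rw [hV0, hAe, Int.emod_eq_of_lt (by omega) ?_]
    have h2 : (ACC.natAbs : Nat) < 2 ^ ('0' :: pvBinDigits ACC.natAbs).length := by
      have hmono : (2:Nat) ^ (('0' :: pvBinDigits ACC.natAbs).length - 1)
          ≤ 2 ^ ('0' :: pvBinDigits ACC.natAbs).length :=
        Nat.pow_le_pow_right (by norm_num) (by omega)
      omega
    calc ACC = ((ACC.natAbs : Nat) : Int) := hAe.symm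
      _ < ((2 ^ ('0' :: pvBinDigits ACC.natAbs).length : Nat) : Int) := by exact_mod_cast h2
      _ = 2 ^ ('0' :: pvBinDigits ACC.natAbs).length := by push_cast; ring

lemma pvShiftStep_spec (opcode : String) (l : List Char) (hne : l ≠ []) (hb : pvBits l) :
    (pvShiftStep opcode l).length = l.length
    ∧ pvBits (pvShiftStep opcode l)
    ∧ pvV (pvShiftStep opcode l)
        = (if opcode == "LSL" then (2 * pvV l) % 2 ^ l.length else pvV l / 2)
    ∧ pvShiftStep opcode l ≠ [] := by
  unfold pvShiftStep
  split
  · -- LSL: drop the top bit, append '0'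
    obtain ⟨c, t, rfl⟩ := List.ne_nil_iff_exists_cons.mp hne
    have ht : pvBits t := fun x hx => hb x (List.mem_cons_of_mem _ hx)
    have hvt := pvV_lt t
    refine ⟨by simp, ?_, ?_, by simp⟩
    · intro x hx
      rcases List.mem_append.mp hx with hx | hx
      · exact ht x (by simpa using hx)
      · rcases List.mem_singleton.mp hx with rfl; left; rfl
    · simp only [List.drop_succ_cons, List.drop_zero, pvV_append_single, pvV_cons,
        List.length_cons, pvBit_zero, pow_succ]
      rcases Nat.le_one_iff_eq_zero_or_eq_one.mp (pvBit_le_one c) with h1 | h1 <;> rw [h1]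
      · rw [Nat.mod_eq_of_lt (by omega)]
        omega
      · rw [show 2 * (1 * 2 ^ t.length + pvV t) = 2 * pvV t + 2 ^ t.length * 2 by ring,
          Nat.add_mod_right, Nat.mod_eq_of_lt (by omega)]
        omega
  · -- other opcode: prepend '0', drop the last bit
    have hsplit : l.dropLast ++ [l.getLast hne] = l := List.dropLast_concat_getLast hne
    have hd : pvBits l.dropLast := fun x hx => hb x (List.dropLast_sublist l |>.mem hx)
    refine ⟨?_, ?_, ?_, by simp⟩
    · have := List.length_pos_iff.mpr hne
      simp only [List.length_cons, List.length_dropLast]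
      omega
    · intro x hx
      rcases List.mem_cons.mp hx with rfl | hx
      · left; rfl
      · exact hd x hx
    · have hlast := pvBit_le_one (l.getLast hne)
      rw [pvV_cons, pvBit_zero, Nat.zero_mul, Nat.zero_add]
      conv_rhs => rw [← hsplit]
      rw [pvV_append_single]
      omega

lemma pvShiftLoop_spec (opcode : String) (k : Nat) (l : List Char) (hne : l ≠ []) (hb : pvBits l) :
    (pvShiftLoop opcode k l).length = l.length
    ∧ pvBits (pvShiftLoop opcode k l)
    ∧ pvV (pvShiftLoop opcode k l)
        = (if opcode == "LSL" then (pvV l * 2 ^ k) % 2 ^ l.length else pvV l / 2 ^ k)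
    ∧ pvShiftLoop opcode k l ≠ [] := by
  induction k generalizing l with
  | zero =>
    refine ⟨rfl, hb, ?_, hne⟩
    have hlt := pvV_lt l
    rw [pvShiftLoop]
    split <;> simp [Nat.mod_eq_of_lt hlt]
  | succ k ih =>
    obtain ⟨slen, sbits, sval, sne⟩ := pvShiftStep_spec opcode l hne hb
    obtain ⟨ilen, ibits, ival, ine⟩ := ih (pvShiftStep opcode l) sne sbits
    refine ⟨by rw [show pvShiftLoop opcode (k+1) l = pvShiftLoop opcode k (pvShiftStep opcode l) from rfl, ilen, slen],
      ibits, ?_, ine⟩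
    rw [show pvShiftLoop opcode (k+1) l = pvShiftLoop opcode k (pvShiftStep opcode l) from rfl,
      ival, sval, slen]
    split
    · rw [Nat.mod_mul_mod]
      congr 1
      ring
    · rw [Nat.div_div_eq_div_mul]
      congr 1
      rw [pow_succ]
      ring

lemma pvDenaryRev_append (xs : List Char) (c : Char) (e : Nat) (h : pvBits xs) :
    pvDenaryRev (xs ++ [c]) e
      = 2 ^ e * (pvVrev xs : Int) + (if c = '1' then -(2 ^ (e + xs.length)) else
          ((c.toNat : Int) - 48) * 2 ^ (e + xs.length)) := by
  induction xs generalizing e with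
  | nil =>
    by_cases hc : c = '1'
    · subst hc
      simp [pvDenaryRev, pvVrev]
    · simp [pvDenaryRev, pvVrev, hc]
  | cons x xs ih =>
    have hxs : pvBits xs := fun y hy => h y (List.mem_cons_of_mem _ hy)
    have hx : ((x.toNat : Int) - 48) = (pvBit x : Int) := by
      rcases h x (List.mem_cons_self ..) with rfl | rfl <;> simp [pvBit]
    rw [List.cons_append, pvDenaryRev]
    rw [if_neg (by simp : ¬ (xs ++ [c] = [] ∧ x = '1'))]
    rw [ih _ hxs, hx]
    simp only [pvVrev, List.length_cons]
    push_cast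
    split <;> ring_nf

lemma pvDenary_spec (l : List Char) (hne : l ≠ []) (h : pvBits l) :
    DenaryConvertion l
      = if 2 ^ (l.length - 1) ≤ pvV l then (pvV l : Int) - 2 ^ l.length else (pvV l : Int) := by
  obtain ⟨c, t, rfl⟩ := List.ne_nil_iff_exists_cons.mp hne
  have ht : pvBits t := fun x hx => h x (List.mem_cons_of_mem _ hx)
  have htr : pvBits t.reverse := fun x hx => ht x (List.mem_reverse.mp hx)
  have hVt : pvVrev t.reverse = pvV t := rfl
  have hvt := pvVrev_lt t.reverse
  rw [List.length_reverse, hVt] at hvt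
  unfold DenaryConvertion
  rw [List.reverse_cons, pvDenaryRev_append t.reverse c 0 htr, hVt, pvV_cons,
    List.length_reverse]
  rcases h c (List.mem_cons_self ..) with rfl | rfl
  · rw [pvBit_zero, pow_zero, one_mul, Nat.zero_mul, Nat.zero_add,
      if_neg (by decide : ¬ ('0':Char) = '1'),
      show ((('0':Char).toNat : Nat) : Int) - 48 = 0 by decide, zero_mul, add_zero,
      if_neg (by simp only [List.length_cons, Nat.add_sub_cancel]; omega)]
    norm_num
  · rw [pvBit_one, one_mul, pow_zero, one_mul, if_pos rfl,
      if_pos (by simp only [List.length_cons, Nat.add_sub_cancel]; omega)]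
    simp only [List.length_cons, Nat.zero_add]
    push_cast
    ring

-- ===== VERDICT (by name: the statement is the Claim_ definition above) =====
theorem BitsShifting_spec : Claim_equal_BitsShifting := by
  intro ACC num_places opcode _
  unfold Spec_BitsShifting BitsShifting BitsShifting_alt
  dsimp only
  obtain ⟨hb, hlen, hval⟩ := pvBinConv_spec ACC
  set B0 := BinaryConvertion ACC with hB0
  rw [← hlen]                      -- B's width is A's string length
  have hne : B0 ≠ [] := by
    intro h0
    have hl0 := congrArg List.length h0
    simp only [List.length_nil] at hl0
    omega
  set k := num_places.toNat with hk
  obtain ⟨slen, sbits, sval, sne⟩ := pvShiftLoop_spec opcode k B0 hne hb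
  rw [pvDenary_spec _ sne sbits, slen]
  have hL1 : 1 ≤ B0.length := by omega
  have hMpow : ((1:Int) <<< B0.length) = 2 ^ B0.length := by
    rw [Int.shiftLeft_eq]; ring
  have hMpos : (0:Int) < 2 ^ B0.length := by positivity
  have hmod : PySem.Int.mod ACC ((1:Int) <<< B0.length) = (pvV B0 : Int) := by
    rw [hMpow, PySem.Int.mod_eq_emod_of_pos hMpos, hval]
  have hhalf : PySem.Int.floordiv ((1:Int) <<< B0.length) 2 = 2 ^ (B0.length - 1) := by
    rw [hMpow, PySem.Int.floordiv_eq_ediv_of_pos (by norm_num),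
      show (2:Int) ^ B0.length = 2 ^ (B0.length - 1) * 2 by rw [← pow_succ]; congr 1; omega]
    rw [Int.mul_ediv_cancel _ (by norm_num)]
  -- both final branches agree once B's integer equals A's unsigned shifted value
  have finish : ∀ R : Int, R = (pvV (pvShiftLoop opcode k B0) : Int) →
      (if 2 ^ (B0.length - 1) ≤ pvV (pvShiftLoop opcode k B0)
        then ((pvV (pvShiftLoop opcode k B0) : Int)) - 2 ^ B0.length
        else ((pvV (pvShiftLoop opcode k B0) : Int)))
      = if R ≥ PySem.Int.floordiv ((1:Int) <<< B0.length) 2 then R - (1:Int) <<< B0.length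
        else R := by
    intro R hR
    rw [hR, hhalf, hMpow]
    by_cases hge : ((2:Int)) ^ (B0.length - 1) ≤ (pvV (pvShiftLoop opcode k B0) : Int)
    · rw [if_pos (by exact_mod_cast hge), if_pos hge]
    · rw [if_neg (by exact_mod_cast hge), if_neg hge]
  by_cases hnp : num_places > 0
  · rw [if_pos hnp]
    by_cases hop : (opcode == "LSL") = true
    · rw [if_pos hop]
      refine finish _ ?_
      rw [sval, if_pos hop, hmod, Int.shiftLeft_eq,
        PySem.Int.mod_eq_emod_of_pos (by rw [hMpow]; exact hMpos), hMpow]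
      push_cast
      ring_nf
    · rw [if_neg hop]
      refine finish _ ?_
      rw [sval, if_neg hop, hmod, Int.shiftRight_eq_div_pow]
      push_cast
      ring_nf
  · rw [if_neg hnp]
    refine finish _ ?_
    have hk0 : k = 0 := by omega
    rw [hk0, show pvShiftLoop opcode 0 B0 = B0 from rfl, hmod]
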